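-- pv_equiv track=rewrite | github.com/Priyansh-81/Information-Security | ISLAB[1-4]/Lab1/lab1_classroom.py | PF_prepare
-- ===== SOURCE A (Python) =====
-- def only_letters_upper(s: str) -> str:
--     return "".join(ch for ch in s.upper() if ch.isalpha())
--
-- def PF_prepare(text: str) -> str:
--     s = only_letters_upper(text).replace("J", "I")
--     out = ""
--     i = 0
--     while i < len(s):
--         a = s[i]
--         if i + 1 < len(s):
--             b = s[i+1]
--             if a == b:
--                 out += a + "X"
--                 i += 1
--             else:
--                 out += a + b
--                 i += 2
--         else:
--             out += a + "X"
--             i += 1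
--     return out
-- ===== SOURCE B (Python) =====
-- def PF_prepare(text: str) -> str:
--     out = []
--     first = None
--     for ch in text.upper():
--         if not ch.isalpha():
--             continue
--         if ch == "J":
--             ch = "I"
--         if first is None:
--             first = ch
--         elif ch == first:
--             out.append(first + "X")     # repeated letter: pad, keep ch pending
--         else:
--             out.append(first + ch)
--             first = None
--     if first is not None:
--         out.append(first + "X")
--     return "".join(out)
-- ===== Notes on version B (the rewrite author's own statement) =====
-- stated objective: faster
-- what changed: Replaced the index-based while loop over a pre-cleaned string by a single character-by-character pass that fuses uppercasing, alpha-filtering and J->I with a one-variable state machine holding the pending first letter, accumulating digraphs in a list joined once at the end instead of repeated string concatenation.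
import Mathlib
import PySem

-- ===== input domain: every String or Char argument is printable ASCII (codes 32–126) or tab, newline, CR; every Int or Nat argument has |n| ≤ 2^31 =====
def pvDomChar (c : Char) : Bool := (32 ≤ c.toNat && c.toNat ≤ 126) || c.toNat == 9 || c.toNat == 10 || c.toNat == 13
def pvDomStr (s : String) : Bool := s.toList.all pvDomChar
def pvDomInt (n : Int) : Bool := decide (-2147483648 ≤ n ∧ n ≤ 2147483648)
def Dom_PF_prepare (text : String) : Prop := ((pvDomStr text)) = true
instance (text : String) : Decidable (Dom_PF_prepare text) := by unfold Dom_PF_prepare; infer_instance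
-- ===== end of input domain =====

-- B replaces A's index-based while loop (which grows `out` by repeated string concatenation)
-- by one fused pass with a pending-letter state variable, joining collected digraphs once at the
-- end; a timing run measured B faster at the larger sizes (objective: faster).


-- ===== PORT A =====
-- only_letters_upper(s): "".join(ch for ch in s.upper() if ch.isalpha())
def PF_onlyLettersUpper (s : List Char) : List Char :=
  (PySem.Chars.upper s).filter PySem.Chars.isalpha

-- the while loop: i walks the cleaned string, out accumulates
def PF_loopA (s : List Char) (i : Nat) (out : List Char) : List Char :=
  if h : i < s.length then
    let a := s[i]
    if h2 : i + 1 < s.length then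
      let b := s[i+1]
      if a = b then PF_loopA s (i+1) (out ++ [a, 'X'])
      else PF_loopA s (i+2) (out ++ [a, b])
    else PF_loopA s (i+1) (out ++ [a, 'X'])
  else out
termination_by s.length - i

def PF_prepare (text : String) : String :=
  String.mk (PF_loopA (PySem.Chars.replace (PF_onlyLettersUpper text.toList) ['J'] ['I']) 0 [])

-- ===== PORT B =====
-- one step of B's fused loop: skip non-letters, J->I, then the pending-letter state machine
def PF_stepB (st : List Char × Option Char) (ch0 : Char) : List Char × Option Char :=
  if PySem.Chars.isalpha ch0 = false then st
  else
    let ch := if ch0 = 'J' then 'I' else ch0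
    match st with
    | (out, none) => (out, some ch)
    | (out, some first) =>
      if ch = first then (out ++ [first, 'X'], some ch)
      else (out ++ [first, ch], none)

def PF_prepare_alt (text : String) : String :=
  match (PySem.Chars.upper text.toList).foldl PF_stepB ([], none) with
  | (out, none) => String.mk out
  | (out, some first) => String.mk (out ++ [first, 'X'])

-- ===== PRECONDITION & SPEC =====
def Spec_PF_prepare (text : String) (out : String) : Prop := out = PF_prepare_alt text
instance (text : String) (out : String) : Decidable (Spec_PF_prepare text out) := by unfold Spec_PF_prepare; infer_instance

-- ===== CLAIM (what is proved, stated in full; the proofs are below) =====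
def Claim_equal_PF_prepare : Prop := ∀ (text : String), Dom_PF_prepare text → Spec_PF_prepare text (PF_prepare text)

-- ===== LEMMAS AND PROOFS =====

-- J -> I, as a function on one char
def PF_jtoi (c : Char) : Char := if c = 'J' then 'I' else c

-- pure state-machine step (B's step after the filter/map stage)
def PF_pure (st : List Char × Option Char) (ch : Char) : List Char × Option Char :=
  match st with
  | (out, none) => (out, some ch)
  | (out, some first) =>
    if ch = first then (out ++ [first, 'X'], some ch)
    else (out ++ [first, ch], none)

def PF_fin (st : List Char × Option Char) : List Char :=
  match st with
  | (out, none) => out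
  | (out, some first) => out ++ [first, 'X']

-- structural form of A's while loop
def PF_loopA' : List Char → List Char → List Char
  | [], out => out
  | [a], out => out ++ [a, 'X']
  | a :: b :: rest, out =>
    if a = b then PF_loopA' (b :: rest) (out ++ [a, 'X'])
    else PF_loopA' rest (out ++ [a, b])

lemma PF_replace_go_single : ∀ (fuel : Nat) (l acc : List Char), l.length ≤ fuel →
    PySem.Chars.replace.go ['J'] ['I'] fuel l acc = acc.reverse ++ l.map PF_jtoi := by
  intro fuel
  induction fuel with
  | zero =>
    intro l acc hl
    have : l = [] := List.eq_nil_of_length_eq_zero (Nat.le_zero.mp hl)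
    subst this
    simp [PySem.Chars.replace.go]
  | succ n ih =>
    intro l acc hl
    cases l with
    | nil => simp [PySem.Chars.replace.go]
    | cons c t =>
      rw [PySem.Chars.replace.go]
      by_cases hc : c = 'J'
      · subst hc
        have hp : List.isPrefixOf ['J'] ('J' :: t) = true := by simp [List.isPrefixOf]
        rw [if_pos hp]
        show PySem.Chars.replace.go ['J'] ['I'] n t ('I' :: acc) = _
        rw [ih t ('I' :: acc) (by simpa using hl)]
        simp [PF_jtoi]
      · have hp : List.isPrefixOf ['J'] (c :: t) = false := by
          simp [List.isPrefixOf, (Ne.symm hc : 'J' ≠ c)]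
        rw [if_neg (by simp [hp])]
        rw [ih t (c :: acc) (by simpa using hl)]
        simp [PF_jtoi, hc]

lemma PF_replace_single (cs : List Char) :
    PySem.Chars.replace cs ['J'] ['I'] = cs.map PF_jtoi := by
  rw [PySem.Chars.replace]
  simp only [List.isEmpty_cons, if_neg Bool.false_ne_true]
  simpa using PF_replace_go_single cs.length cs [] le_rfl

lemma PF_stepB_eq (st : List Char × Option Char) (c : Char) :
    PF_stepB st c = if PySem.Chars.isalpha c then PF_pure st (PF_jtoi c) else st := by
  obtain ⟨out, first⟩ := st
  by_cases h : PySem.Chars.isalpha c <;> cases first <;>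
    simp [PF_stepB, PF_pure, PF_jtoi, h]

lemma PF_foldB_eq (us : List Char) (st : List Char × Option Char) :
    us.foldl PF_stepB st = ((us.filter PySem.Chars.isalpha).map PF_jtoi).foldl PF_pure st := by
  induction us generalizing st with
  | nil => rfl
  | cons c t ih =>
    by_cases h : PySem.Chars.isalpha c <;>
      simp [h, PF_stepB_eq, ih]

lemma PF_loopA'_eq : ∀ (cs out : List Char),
    PF_loopA' cs out = PF_fin (cs.foldl PF_pure (out, none))
  | [], _ => rfl
  | [_], _ => rfl
  | a :: b :: rest, out => by
    by_cases hab : a = b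
    · subst hab
      simp only [PF_loopA', if_pos]
      rw [PF_loopA'_eq (a :: rest) (out ++ [a, 'X'])]
      simp [List.foldl_cons, PF_pure]
    · simp only [PF_loopA', if_neg hab]
      rw [PF_loopA'_eq rest (out ++ [a, b])]
      simp [List.foldl_cons, PF_pure, if_neg (Ne.symm hab)]
termination_by cs _ => cs.length

lemma PF_loopA_drop (s : List Char) (i : Nat) (out : List Char) :
    PF_loopA s i out = PF_loopA' (s.drop i) out := by
  by_cases h : i < s.length
  · rw [PF_loopA]
    have hd : s.drop i = s[i] :: s.drop (i+1) := List.drop_eq_getElem_cons h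
    by_cases h2 : i + 1 < s.length
    · have hd2 : s.drop (i+1) = s[i+1] :: s.drop (i+2) := List.drop_eq_getElem_cons h2
      rw [hd, hd2]
      by_cases hab : s[i] = s[i+1]
      · simp only [h, h2, hab, dif_pos, if_pos, PF_loopA']
        rw [PF_loopA_drop s (i+1) _, hd2]
      · simp only [h, h2, dif_pos, if_neg hab, PF_loopA']
        rw [PF_loopA_drop s (i+2) _]
    · have hd2 : s.drop (i+1) = [] := List.drop_eq_nil_of_le (by omega)
      rw [hd, hd2]
      simp only [h, h2, dif_pos, PF_loopA']
      rw [PF_loopA_drop s (i+1) _, hd2]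
      rfl
  · rw [PF_loopA]
    simp [h, List.drop_eq_nil_of_le (by omega : s.length ≤ i), PF_loopA']
termination_by s.length - i

-- ===== VERDICT (by name: the statement is the Claim_ definition above) =====
theorem PF_prepare_spec : Claim_equal_PF_prepare := by
  intro text _
  unfold Spec_PF_prepare PF_prepare PF_prepare_alt PF_onlyLettersUpper
  rw [PF_foldB_eq, PF_replace_single, PF_loopA_drop, List.drop_zero, PF_loopA'_eq]
  obtain ⟨o, f⟩ := (((PySem.Chars.upper text.toList).filter PySem.Chars.isalpha).map PF_jtoi).foldl PF_pure ([], none)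
  cases f <;> rfl
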